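-- pv_equiv track=rewrite | github.com/davidbelfiori/Foi | eserciziesame/ricorsione.py | grassi1
-- ===== SOURCE A (Python) =====
-- def grassi1(l,n):
--     if not l:
--         return []
--     elif len(l)==1: return  l
--     elif l[1]!=n:
--         return [l[0]]+grassi1(l[1:],n)
--     else:
--         return  grassi1(l[1:], n)
-- ===== SOURCE B (Python) =====
-- def grassi1(l, n):
--     res = []
--     have_prev = False
--     prev = None
--     for x in l:
--         if have_prev and x != n:
--             res.append(prev)
--         prev = x
--         have_prev = True
--     if have_prev:
--         res.append(prev)
--     return res
-- ===== Notes on version B (the rewrite author's own statement) =====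
-- stated objective: faster
-- what changed: Recursion with list slicing and concatenation is replaced by a single iterative pass carrying the previous element, appending it when the current element differs from n and appending the last element at the end.
import Mathlib
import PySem

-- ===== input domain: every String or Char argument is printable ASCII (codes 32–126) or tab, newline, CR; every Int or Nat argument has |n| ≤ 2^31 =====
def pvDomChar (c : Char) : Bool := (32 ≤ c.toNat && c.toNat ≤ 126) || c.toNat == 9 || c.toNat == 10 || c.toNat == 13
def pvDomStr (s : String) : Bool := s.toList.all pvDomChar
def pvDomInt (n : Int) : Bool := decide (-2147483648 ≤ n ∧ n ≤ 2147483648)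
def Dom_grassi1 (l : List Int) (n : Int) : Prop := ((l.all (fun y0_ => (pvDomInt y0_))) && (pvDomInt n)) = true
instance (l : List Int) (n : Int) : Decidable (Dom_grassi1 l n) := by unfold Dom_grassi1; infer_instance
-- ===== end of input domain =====

-- B replaces A's recursion with slicing/concatenation by one iterative pass carrying the previous element (faster).
-- ===== PORT A =====
def grassi1 (l : List Int) (n : Int) : List Int :=
  match l with
  | [] => []
  | [x] => [x]
  | x :: y :: rest =>
      if y ≠ n then x :: grassi1 (y :: rest) n
      else grassi1 (y :: rest) n

-- ===== PORT B =====
-- one pass: state (res, prev); append prev when the current element ≠ n, finally append prev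
def grassi1AltStep (n : Int) (st : List Int × Option Int) (x : Int) : List Int × Option Int :=
  match st.2 with
  | none => (st.1, some x)
  | some p => ((if x ≠ n then st.1 ++ [p] else st.1), some x)

def grassi1_alt (l : List Int) (n : Int) : List Int :=
  let st := l.foldl (grassi1AltStep n) ([], none)
  match st.2 with
  | none => st.1
  | some p => st.1 ++ [p]

-- ===== PRECONDITION & SPEC =====
def Spec_grassi1 (l : List Int) (n : Int) (out : List Int) : Prop := out = grassi1_alt l n
instance (l : List Int) (n : Int) (out : List Int) : Decidable (Spec_grassi1 l n out) := by unfold Spec_grassi1; infer_instance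

-- ===== CLAIM (what is proved, stated in full; the proofs are below) =====
def Claim_equal_grassi1 : Prop := ∀ (l : List Int) (n : Int), Dom_grassi1 l n → Spec_grassi1 l n (grassi1 l n)

-- ===== LEMMAS AND PROOFS =====

-- ===== VERDICT (by name: the statement is the Claim_ definition above) =====
-- loop invariant: from state (res, some y) the remaining loop plus the final append
-- produces res ++ grassi1 (y :: rest) n
theorem grassi1_loop (n : Int) : ∀ (rest : List Int) (y : Int) (res : List Int),
    (let st := rest.foldl (grassi1AltStep n) (res, some y)
     match st.2 with
     | none => st.1
     | some p => st.1 ++ [p]) = res ++ grassi1 (y :: rest) n := by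
  intro rest
  induction rest with
  | nil => intro y res; simp [grassi1]
  | cons x rest ih =>
      intro y res
      simp only [List.foldl_cons, grassi1AltStep]
      by_cases h : x = n
      · simp only [h, ne_eq, not_true_eq_false, if_false, ih]
        simp [grassi1]
      · simp only [ne_eq, h, not_false_eq_true, if_true, ih]
        simp [grassi1, h, List.append_assoc]

theorem grassi1_spec : Claim_equal_grassi1 := by
  intro l n _
  unfold Spec_grassi1 grassi1_alt
  cases l with
  | nil => rfl
  | cons y rest =>
      simpa using (grassi1_loop n rest y []).symm
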